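-- pv_equiv track=rewrite | github.com/dt-memyrlabs/agentdiff | src/agentdiff/blame.py | _find_block_in_lines
-- ===== SOURCE A (Python) =====
-- def _find_block_in_lines(
--     file_lines: list[str], block_lines: list[str]
-- ) -> list[int] | None:
--     """Find a contiguous block of lines in a file. Returns line indices or None."""
--     if not block_lines:
--         return None
--     block_len = len(block_lines)
--     for start in range(len(file_lines) - block_len + 1):
--         if file_lines[start : start + block_len] == block_lines:
--             return list(range(start, start + block_len))
--
--     # Fallback: stripped comparison
--     stripped_block = [l.strip() for l in block_lines]
--     for start in range(len(file_lines) - block_len + 1):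
--         stripped_file = [l.strip() for l in file_lines[start : start + block_len]]
--         if stripped_file == stripped_block:
--             return list(range(start, start + block_len))
--
--     return None
-- ===== SOURCE B (Python) =====
-- def _scan(hay, needle):
--     """First index where needle is a prefix of hay's suffix; peels hay structurally."""
--     i = 0
--     rest = hay
--     while len(rest) >= len(needle):
--         if rest[:len(needle)] == needle:
--             return i
--         rest = rest[1:]
--         i += 1
--     return None
--
--
-- def _find_block_in_lines(file_lines, block_lines):
--     if not block_lines:
--         return None
--     start = _scan(file_lines, block_lines)
--     if start is None:
--         start = _scan([l.strip() for l in file_lines],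
--                       [l.strip() for l in block_lines])
--     if start is None:
--         return None
--     return list(range(start, start + len(block_lines)))
-- ===== Notes on version B (the rewrite author's own statement) =====
-- stated objective: alternative
-- what changed: A scans start indices twice, slicing the file and re-stripping every m-line window in the fallback pass; B strips both lists once up front and finds the block by structurally peeling the file suffix by suffix with a prefix test.
import Mathlib
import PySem

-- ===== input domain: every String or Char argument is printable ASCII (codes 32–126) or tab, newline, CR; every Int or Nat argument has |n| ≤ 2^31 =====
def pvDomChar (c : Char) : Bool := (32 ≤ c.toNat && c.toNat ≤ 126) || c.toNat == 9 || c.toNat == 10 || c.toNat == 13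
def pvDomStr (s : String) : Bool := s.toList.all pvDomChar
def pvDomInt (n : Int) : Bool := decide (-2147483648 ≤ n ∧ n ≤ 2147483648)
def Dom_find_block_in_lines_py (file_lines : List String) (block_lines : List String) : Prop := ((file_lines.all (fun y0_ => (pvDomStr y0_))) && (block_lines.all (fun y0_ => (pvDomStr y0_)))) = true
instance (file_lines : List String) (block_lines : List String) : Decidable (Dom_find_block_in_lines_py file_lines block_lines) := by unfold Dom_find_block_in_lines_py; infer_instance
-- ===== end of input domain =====

-- B replaces A's two index-and-slice scans (the second of which re-strips every window) by a
-- structural suffix scan with one-time stripping of both lists; objective: alternative decomposition.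

-- ===== PORT A =====
-- `stepFirst acc v` encodes the loop's early `return`: once the accumulator holds a result it is kept.
def stepFirst {α : Type} (acc : Option α) (v : Option α) : Option α :=
  match acc with
  | some r => some r
  | none => v

def find_block_in_lines_py (file_lines : List String) (block_lines : List String) : Option (List Int) :=
  if block_lines = [] then none
  else
    let block_len : Int := block_lines.length
    let first :=
      (PySem.List.pyRange 0 ((file_lines.length : Int) - block_len + 1) 1).foldl
        (fun acc start => stepFirst acc
          (if PySem.List.slice file_lines (some start) (some (start + block_len)) = block_lines
           then some (PySem.List.pyRange start (start + block_len) 1)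
           else none)) none
    match first with
    | some r => some r
    | none =>
      let stripped_block := block_lines.map PySem.Str.strip
      (PySem.List.pyRange 0 ((file_lines.length : Int) - block_len + 1) 1).foldl
        (fun acc start => stepFirst acc
          (if (PySem.List.slice file_lines (some start) (some (start + block_len))).map PySem.Str.strip
                = stripped_block
           then some (PySem.List.pyRange start (start + block_len) 1)
           else none)) none

-- ===== PORT B =====
-- _scan: peel the haystack suffix by suffix, testing the needle as a prefix
def scanB (needle : List String) (rest : List String) (i : Int) : Option Int :=
  if needle.length ≤ rest.length then
    if rest.take needle.length = needle then some i
    else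
      match rest with
      | [] => none
      | _ :: t => scanB needle t (i + 1)
  else none
termination_by rest.length
decreasing_by simp

def find_block_in_lines_py_alt (file_lines : List String) (block_lines : List String) : Option (List Int) :=
  if block_lines = [] then none
  else
    let start :=
      match scanB block_lines file_lines 0 with
      | some s => some s
      | none => scanB (block_lines.map PySem.Str.strip) (file_lines.map PySem.Str.strip) 0
    match start with
    | none => none
    | some s => some (PySem.List.pyRange s (s + (block_lines.length : Int)) 1)

-- ===== PRECONDITION & SPEC =====
def Spec_find_block_in_lines_py (file_lines : List String) (block_lines : List String) (out : Option (List Int)) : Prop := out = find_block_in_lines_py_alt file_lines block_lines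
instance (file_lines : List String) (block_lines : List String) (out : Option (List Int)) : Decidable (Spec_find_block_in_lines_py file_lines block_lines out) := by unfold Spec_find_block_in_lines_py; infer_instance

-- ===== CLAIM (what is proved, stated in full; the proofs are below) =====
def Claim_equal_find_block_in_lines_py : Prop := ∀ (file_lines : List String) (block_lines : List String), Dom_find_block_in_lines_py file_lines block_lines → Spec_find_block_in_lines_py file_lines block_lines (find_block_in_lines_py file_lines block_lines)

-- ===== LEMMAS AND PROOFS =====

-- the first index j ≤ |hay| at which needle is a prefix of drop j hay (proof-side normal form)
def ff (hay needle : List String) : Option Nat :=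
  (List.range (hay.length + 1)).find? (fun j => decide ((hay.drop j).take needle.length = needle))

theorem ff_cons_pos (x : String) (t needle : List String)
    (h0 : (x :: t).take needle.length = needle) : ff (x :: t) needle = some 0 := by
  rw [ff, List.range_succ_eq_map, List.find?_cons]
  simp [h0]

theorem ff_cons_neg (x : String) (t needle : List String)
    (h0 : ¬ (x :: t).take needle.length = needle) :
    ff (x :: t) needle = (ff t needle).map (· + 1) := by
  rw [ff, List.range_succ_eq_map, List.find?_cons]
  simp only [List.drop_zero, h0, decide_false]
  rw [List.find?_map, ff]
  have hlen : (x :: t).length = t.length + 1 := by simp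
  rw [hlen]
  have hfun : ((fun j => decide (((x :: t).drop j).take needle.length = needle)) ∘ Nat.succ)
      = fun j => decide ((t.drop j).take needle.length = needle) := by
    funext j; simp
  rw [hfun]

theorem scanB_eq_ff (needle : List String) (hm : needle ≠ []) :
    ∀ (hay : List String) (i : Int),
      scanB needle hay i = (ff hay needle).map (fun j => i + (j : Int)) := by
  obtain ⟨a, nt, rfl⟩ := List.exists_cons_of_ne_nil hm
  intro hay
  induction hay with
  | nil =>
    intro i
    rw [scanB, ff]
    simp
  | cons x t ih =>
    intro i
    by_cases hpre : (x :: t).take (a :: nt).length = (a :: nt)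
    · have hlen : (a :: nt).length ≤ (x :: t).length := by
        have h := congrArg List.length hpre
        simp at h
        simp only [List.length_cons]
        omega
      rw [scanB]
      simp only [hlen, if_true, hpre, if_true, ff_cons_pos x t _ hpre]
      simp
    · rw [scanB, ff_cons_neg x t _ hpre]
      by_cases hlen : (a :: nt).length ≤ (x :: t).length
      · simp only [hlen, if_true, hpre, if_false]
        rw [ih (i + 1)]
        cases h : ff t (a :: nt) with
        | none => simp
        | some j =>
          simp
          omega
      · have hnone : ff t (a :: nt) = none := by
          apply List.find?_eq_none.mpr
          intro j hj
          simp only [decide_eq_true_eq]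
          intro hc
          have h := congrArg List.length hc
          simp [List.length_take] at h
          simp only [List.length_cons] at h hlen
          omega
        rw [if_neg hlen, hnone]
        simp

theorem foldl_firstSome_const {α : Type} (l : List Int) (f : Int → Option α) (r : α) :
    l.foldl (fun acc s => stepFirst acc (f s)) (some r) = some r := by
  induction l with
  | nil => rfl
  | cons x t ih => simpa [stepFirst] using ih

theorem foldl_firstSome {α : Type} (l : List Int) (p : Int → Prop) [DecidablePred p] (g : Int → α) :
    l.foldl (fun acc s => stepFirst acc (if p s then some (g s) else none)) none
    = (l.find? (fun s => decide (p s))).map g := by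
  induction l with
  | nil => rfl
  | cons x t ih =>
    by_cases h : p x
    all_goals rw [List.foldl_cons, show stepFirst (none : Option α) (if p x then some (g x) else none) = (if p x then some (g x) else none) from rfl]
    · rw [if_pos h, foldl_firstSome_const t (fun s => if p s then some (g s) else none) (g x)]
      simp [h]
    · rw [if_neg h, ih]
      simp [h]

theorem find?_range_extend (a b : Nat) (p : Nat → Bool) (hab : a ≤ b)
    (hfalse : ∀ j, a ≤ j → j < b → p j = false) :
    (List.range b).find? p = (List.range a).find? p := by
  have hb : b = a + (b - a) := by omega
  rw [hb, List.range_add, List.find?_append]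
  have hnone : (List.find? p ((List.range (b - a)).map (a + ·))) = none := by
    apply List.find?_eq_none.mpr
    intro x hx
    simp only [List.mem_map, List.mem_range] at hx
    obtain ⟨k, hk, rfl⟩ := hx
    simp only [Bool.not_eq_true]
    exact hfalse (a + k) (Nat.le_add_right a k) (by omega)
  cases h : (List.range a).find? p <;> simp [hnone]

theorem range_find?_eq_ff (hay needle : List String) (hm : needle ≠ []) :
    (PySem.List.pyRange 0 ((hay.length : Int) - (needle.length : Int) + 1) 1).find?
        (fun s => decide (PySem.List.slice hay (some s) (some (s + (needle.length : Int))) = needle))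
      = (ff hay needle).map (fun j => (j : Int)) := by
  have hmpos : 1 ≤ needle.length := List.length_pos_iff.mpr hm
  rw [PySem.List.pyRange_one]
  simp only [zero_add, sub_zero]
  rw [List.find?_map]
  have hK : (((hay.length : Int) - (needle.length : Int) + 1)).toNat
      = hay.length + 1 - needle.length := by omega
  have hfun : ((fun s => decide (PySem.List.slice hay (some s) (some (s + (needle.length : Int))) = needle))
        ∘ (fun k : Nat => (k : Int)))
      = fun j : Nat => decide ((hay.drop j).take needle.length = needle) := by
    funext j
    simp only [Function.comp_apply, PySem.List.slice_natCast_add]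
  rw [hK, hfun]
  have hff : (List.range (hay.length + 1)).find?
        (fun j => decide ((hay.drop j).take needle.length = needle))
      = (List.range (hay.length + 1 - needle.length)).find?
        (fun j => decide ((hay.drop j).take needle.length = needle)) := by
    apply find?_range_extend _ _ _ (by omega)
    intro j hj hjb
    simp only [decide_eq_false_iff_not]
    intro hc
    have h := congrArg List.length hc
    simp [List.length_take] at h
    omega
  rw [← hff, ff]
  cases h : (List.range (hay.length + 1)).find? (fun j => decide ((hay.drop j).take needle.length = needle)) <;> simp

theorem map_slice {α β : Type} (f : α → β) (xs : List α) (a b : Int) :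
    (PySem.List.slice xs (some a) (some b)).map f = PySem.List.slice (xs.map f) (some a) (some b) := by
  simp [PySem.List.slice, List.map_drop, List.map_take]

theorem passA_eq (hay needle : List String) (hm : needle ≠ []) :
    (PySem.List.pyRange 0 ((hay.length : Int) - (needle.length : Int) + 1) 1).foldl
      (fun acc start => stepFirst acc
        (if PySem.List.slice hay (some start) (some (start + (needle.length : Int))) = needle
         then some (PySem.List.pyRange start (start + (needle.length : Int)) 1)
         else none)) none
    = (scanB needle hay 0).map (fun s => PySem.List.pyRange s (s + (needle.length : Int)) 1) := by
  rw [foldl_firstSome _ (fun s => PySem.List.slice hay (some s) (some (s + (needle.length : Int))) = needle)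
        (fun s => PySem.List.pyRange s (s + (needle.length : Int)) 1)]
  rw [range_find?_eq_ff hay needle hm, scanB_eq_ff needle hm hay 0]
  cases h : ff hay needle <;> simp

theorem passA_strip_eq (hay needle : List String) (hm : needle ≠ []) :
    (PySem.List.pyRange 0 ((hay.length : Int) - (needle.length : Int) + 1) 1).foldl
      (fun acc start => stepFirst acc
        (if (PySem.List.slice hay (some start) (some (start + (needle.length : Int)))).map PySem.Str.strip
              = needle.map PySem.Str.strip
         then some (PySem.List.pyRange start (start + (needle.length : Int)) 1)
         else none)) none
    = (scanB (needle.map PySem.Str.strip) (hay.map PySem.Str.strip) 0).map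
        (fun s => PySem.List.pyRange s (s + (needle.length : Int)) 1) := by
  have hm' : needle.map PySem.Str.strip ≠ [] := by simp [hm]
  have hlh : (hay.length : Int) = ((hay.map PySem.Str.strip).length : Int) := by simp
  have hln : (needle.length : Int) = ((needle.map PySem.Str.strip).length : Int) := by simp
  simp only [map_slice]
  rw [hlh, hln]
  exact passA_eq (hay.map PySem.Str.strip) (needle.map PySem.Str.strip) hm'

-- ===== VERDICT (by name: the statement is the Claim_ definition above) =====
theorem find_block_in_lines_py_spec : Claim_equal_find_block_in_lines_py := by
  intro file_lines block_lines _
  unfold Spec_find_block_in_lines_py find_block_in_lines_py find_block_in_lines_py_alt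
  by_cases hb : block_lines = []
  · simp [hb]
  · rw [if_neg hb, if_neg hb]
    dsimp only
    rw [passA_eq file_lines block_lines hb]
    cases h1 : scanB block_lines file_lines 0 with
    | some s => simp
    | none =>
      simp only [Option.map_none]
      rw [passA_strip_eq file_lines block_lines hb]
      cases h2 : scanB (block_lines.map PySem.Str.strip) (file_lines.map PySem.Str.strip) 0 <;> simp
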